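-- pv_equiv track=rewrite | github.com/TiagoJanela/MMP-potency-prediction | ccrlib_master/ccrlib/fragmentation.py | count_heavy_atoms_and_substitution_sites
-- ===== SOURCE A (Python) =====
-- def count_heavy_atoms_and_substitution_sites(smi: str):
--     """
--     Count the number of heavy atoms and attachment points in a Smiles string
--
--     :param smi: Smiles
--     :return: Tuple of heavy atom count and number of attachment points
--
--     >>> count_heavy_atoms_and_substitution_sites("Oc1cc([*:2])ccc1[*:1]")
--     (7, 2)
--     >>> count_heavy_atoms_and_substitution_sites("[*:3]N1C(=NC(C1=O)(c2ccccc2)c3cc[cH]cc3)[*:1]")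
--     (18, 2)
--     >>> count_heavy_atoms_and_substitution_sites("[*:1]C[C@H]([*:3])[C@@H]1C(=O)N[C@@H](C(=O)N1[C@H](C2=COC(=N2)[*:2])C(=O)N3CCOCC3)C4CC5=CC=CC=C5C4")
--     (33, 3)
--     """
--     # assumes only implicit hydrogens!
--     in_bracket = 0
--     heavy_count = 0
--     sub_sites = 0
--     for c in smi:
--         if in_bracket:
--             if in_bracket == 1:
--                 if c not in "HR*":
--                     heavy_count += 1
--                 elif c in "*R":
--                     sub_sites += 1
--             in_bracket = 0 if c == "]" else in_bracket + 1
--         elif c == "[":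
--             in_bracket = 1
--         elif c.upper() in "BCNOSPFI":
--             heavy_count += 1
--     return heavy_count, sub_sites
-- ===== SOURCE B (Python) =====
-- def count_heavy_atoms_and_substitution_sites(smi: str):
--     """Span-jumping re-implementation: find bracket spans with str.find and
--     count outside chars by slice, instead of a char-by-char state machine."""
--     heavy = 0
--     subs = 0
--     i = 0
--     n = len(smi)
--     while True:
--         j = smi.find('[', i)
--         seg = smi[i:] if j == -1 else smi[i:j]
--         heavy += sum(c.upper() in "BCNOSPFI" for c in seg)
--         if j == -1:
--             return heavy, subs
--         if j + 1 < n: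
--             c = smi[j + 1]
--             if c not in "HR*":
--                 heavy += 1
--             elif c in "*R":
--                 subs += 1
--         k = smi.find(']', j + 1)
--         if k == -1:
--             return heavy, subs
--         i = k + 1
-- ===== Notes on version B (the rewrite author's own statement) =====
-- stated objective: alternative
-- what changed: Replaces A's char-by-char in_bracket state machine with span jumps: str.find locates each opening bracket and its matching closing bracket, the outside segment between brackets is counted by a slice sum, and only the first char inside each bracket span is inspected.
import Mathlib
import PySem

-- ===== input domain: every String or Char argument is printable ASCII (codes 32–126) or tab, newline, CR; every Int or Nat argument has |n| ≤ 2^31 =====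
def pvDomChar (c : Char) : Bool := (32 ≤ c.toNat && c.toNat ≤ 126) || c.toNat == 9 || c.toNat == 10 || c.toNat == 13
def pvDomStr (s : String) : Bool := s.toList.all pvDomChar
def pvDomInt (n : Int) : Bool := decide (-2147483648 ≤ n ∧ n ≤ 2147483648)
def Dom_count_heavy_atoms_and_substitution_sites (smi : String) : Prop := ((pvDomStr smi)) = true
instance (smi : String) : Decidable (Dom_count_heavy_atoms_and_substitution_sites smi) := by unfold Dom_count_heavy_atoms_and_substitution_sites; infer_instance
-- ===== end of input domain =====

-- B replaces A's char-by-char bracket state machine by span jumps (find each bracket span, count a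
-- whole outside slice at once); objective: idiomatic/alternative, same exact result.

-- ===== PORT A =====
-- heavy-atom letters "BCNOSPFI"
def pvHeavyS : List Char := ['B', 'C', 'N', 'O', 'S', 'P', 'F', 'I']

-- one step of A's for-loop on state (in_bracket, heavy_count, sub_sites)
def aStep (st : Int × Int × Int) (c : Char) : Int × Int × Int :=
  if st.1 ≠ 0 then
    let p : Int × Int :=
      if st.1 = 1 then
        if c ∉ (['H', 'R', '*'] : List Char) then (st.2.1 + 1, st.2.2)
        else if c ∈ (['*', 'R'] : List Char) then (st.2.1, st.2.2 + 1)
        else (st.2.1, st.2.2)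
      else (st.2.1, st.2.2)
    (if c = ']' then 0 else st.1 + 1, p.1, p.2)
  else if c = '[' then (1, st.2.1, st.2.2)
  else if c.toUpper ∈ pvHeavyS then (st.1, st.2.1 + 1, st.2.2)
  else (st.1, st.2.1, st.2.2)

def count_heavy_atoms_and_substitution_sites (smi : String) : Int × Int :=
  let st := smi.toList.foldl aStep (0, 0, 0)
  (st.2.1, st.2.2)

-- ===== PORT B =====
-- sum(c.upper() in "BCNOSPFI" for c in seg)
def pvCountHeavy (seg : List Char) : Int :=
  ((seg.filter (fun c => c.toUpper ∈ pvHeavyS)).length : Int)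

-- B's while loop: take the segment up to the next '[' (smi.find('[', i)), count it by slice,
-- handle the first char after '[' (if any), then jump past the next ']' (smi.find(']', j+1)).
def altLoop (cs : List Char) : Int × Int :=
  let suf := cs.dropWhile (· ≠ '[')
  let heavy := pvCountHeavy (cs.takeWhile (· ≠ '['))
  if hs : suf = [] then (heavy, 0)
  else
    let rest := suf.tail
    let fc : Int × Int :=
      match rest.head? with
      | none => (0, 0)
      | some c =>
        if c ∉ (['H', 'R', '*'] : List Char) then (1, 0)
        else if c ∈ (['*', 'R'] : List Char) then (0, 1)
        else (0, 0)
    let suf2 := rest.dropWhile (· ≠ ']')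
    if hs2 : suf2 = [] then (heavy + fc.1, fc.2)
    else
      let r := altLoop suf2.tail
      (heavy + fc.1 + r.1, fc.2 + r.2)
termination_by cs.length
decreasing_by
  show suf2.tail.length < cs.length
  have h1 : suf.length ≤ cs.length := cs.length_dropWhile_le _
  have h2 : suf2.length ≤ rest.length := rest.length_dropWhile_le _
  have h3 : rest.length = suf.length - 1 := by simp [rest, List.length_tail]
  have h4 : 0 < suf.length := List.length_pos_of_ne_nil hs
  have h5 : 0 < suf2.length := List.length_pos_of_ne_nil hs2
  have h6 : suf2.tail.length = suf2.length - 1 := by simp [List.length_tail]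
  omega

def count_heavy_atoms_and_substitution_sites_alt (smi : String) : Int × Int :=
  altLoop smi.toList

-- ===== PRECONDITION & SPEC =====
def Spec_count_heavy_atoms_and_substitution_sites (smi : String) (out : Int × Int) : Prop := out = count_heavy_atoms_and_substitution_sites_alt smi
instance (smi : String) (out : Int × Int) : Decidable (Spec_count_heavy_atoms_and_substitution_sites smi out) := by unfold Spec_count_heavy_atoms_and_substitution_sites; infer_instance

-- ===== CLAIM (what is proved, stated in full; the proofs are below) =====
def Claim_equal_count_heavy_atoms_and_substitution_sites : Prop := ∀ (smi : String), Dom_count_heavy_atoms_and_substitution_sites smi → Spec_count_heavy_atoms_and_substitution_sites smi (count_heavy_atoms_and_substitution_sites smi)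

-- ===== LEMMAS AND PROOFS =====

-- A over a bracket-free segment: stays outside, adds the segment's heavy count
lemma foldl_outside (pre : List Char) (h : '[' ∉ pre) (hc ss : Int) :
    pre.foldl aStep (0, hc, ss) = (0, hc + pvCountHeavy pre, ss) := by
  induction pre generalizing hc with
  | nil => simp [pvCountHeavy]
  | cons c t ih =>
    have hc1 : c ≠ '[' := by intro hc1; exact h (hc1 ▸ List.mem_cons_self)
    have ht : '[' ∉ t := fun m => h (List.mem_cons_of_mem _ m)
    by_cases hu : c.toUpper ∈ pvHeavyS <;>
      simp [List.foldl_cons, aStep, hc1, hu, ih ht, pvCountHeavy, List.filter_cons] <;> ring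

-- A with in_bracket ≥ 2: skips chars until the first ']', counts unchanged
lemma foldl_skip (cs : List Char) (ib hc ss : Int) (hib : 2 ≤ ib) :
    cs.foldl aStep (ib, hc, ss) =
      (match cs.dropWhile (· ≠ ']') with
       | [] => (ib + (cs.length : Int), hc, ss)
       | _ :: rest => rest.foldl aStep (0, hc, ss)) := by
  induction cs generalizing ib with
  | nil => simp
  | cons c t ih =>
    by_cases hcl : c = ']'
    · subst hcl
      simp [List.foldl_cons, aStep, show (ib : Int) ≠ 0 by omega, show (ib : Int) ≠ 1 by omega]
    · have hstep : aStep (ib, hc, ss) c = (ib + 1, hc, ss) := by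
        simp only [aStep]
        rw [if_pos (show (ib : Int) ≠ 0 by omega), if_neg hcl]
        simp [show ¬ (ib : Int) = 1 by omega]
      rw [List.foldl_cons, hstep, ih (ib + 1) (by omega)]
      have hdw : (c :: t).dropWhile (· ≠ ']') = t.dropWhile (· ≠ ']') := by
        simp [List.dropWhile_cons, hcl]
      rw [hdw]
      cases h : t.dropWhile (· ≠ ']') with
      | nil =>
        simp only [h, List.length_cons]
        refine congrArg (fun z => ((z : Int), hc, ss)) ?_
        push_cast
        ring
      | cons x xs => simp only [h]

-- main invariant: A's fold from an outside state computes B's span recursion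
lemma main_lemma : ∀ (n : Nat) (cs : List Char), cs.length ≤ n → ∀ (hc ss : Int),
    (cs.foldl aStep (0, hc, ss)).2 = (hc + (altLoop cs).1, ss + (altLoop cs).2) := by
  intro n
  induction n with
  | zero =>
    intro cs hlen hc ss
    have : cs = [] := List.length_eq_zero_iff.mp (Nat.le_zero.mp hlen)
    subst this
    simp [altLoop, pvCountHeavy]
  | succ n ih =>
    intro cs hlen hc ss
    have hsplit := cs.takeWhile_append_dropWhile (p := (· ≠ '['))
    have hpre : '[' ∉ cs.takeWhile (· ≠ '[') := by
      intro m
      have := List.mem_takeWhile_imp m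
      simp at this
    conv_lhs => rw [← hsplit]
    rw [List.foldl_append, foldl_outside _ hpre]
    cases h1 : cs.dropWhile (· ≠ '[') with
    | nil =>
      rw [altLoop]
      simp only [h1]
      rw [dif_pos trivial]
      simp
    | cons b rest =>
      have hlen1 : rest.length + 1 ≤ cs.length := by
        have := cs.length_dropWhile_le (· ≠ '[')
        rw [h1] at this; simpa using this
      have hb : b = '[' := by
        have hne : cs.dropWhile (· ≠ '[') ≠ [] := by rw [h1]; simp
        have h3 := List.head_dropWhile_not (· ≠ '[') (l := cs) hne
        simp only [h1, List.head_cons] at h3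
        simpa using h3
      subst hb
      rw [altLoop]
      rw [dif_neg (show ¬ cs.dropWhile (· ≠ '[') = [] by rw [h1]; simp)]
      simp only [h1, List.tail_cons, List.foldl_cons]
      have hstep1 : aStep (0, hc + pvCountHeavy (cs.takeWhile (· ≠ '[')), ss) '[' =
          (1, hc + pvCountHeavy (cs.takeWhile (· ≠ '[')), ss) := by simp [aStep]
      rw [hstep1]
      have hlen1' : rest.length + 1 ≤ n + 1 := le_trans hlen1 hlen
      cases rest with
      | nil => simp [Prod.ext_iff]
      | cons c rest' =>
        have hstep2 : aStep (1, hc + pvCountHeavy (cs.takeWhile (· ≠ '[')), ss) c =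
            (if c = ']' then 0 else 2,
             hc + pvCountHeavy (cs.takeWhile (· ≠ '[')) +
               (if c ∉ (['H', 'R', '*'] : List Char) then ((1 : Int), (0 : Int))
                else if c ∈ (['*', 'R'] : List Char) then (0, 1) else (0, 0)).1,
             ss + (if c ∉ (['H', 'R', '*'] : List Char) then ((1 : Int), (0 : Int))
                else if c ∈ (['*', 'R'] : List Char) then (0, 1) else (0, 0)).2) := by
          by_cases e1 : c = 'H' <;> by_cases e2 : c = 'R' <;> by_cases e3 : c = '*' <;>
            simp [aStep, List.mem_cons, e1, e2, e3]
        rw [List.foldl_cons, hstep2]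
        by_cases hcl : c = ']'
        · subst hcl
          rw [if_pos rfl]
          rw [ih rest' (by simp at hlen1'; omega) _ _]
          simp [List.dropWhile_cons, Prod.ext_iff] <;> omega
        · rw [if_neg hcl]
          rw [foldl_skip rest' 2 _ _ (le_refl 2)]
          cases h2 : rest'.dropWhile (· ≠ ']') with
          | nil =>
            simp only [h2]
            rw [dif_pos (show (c :: rest').dropWhile (· ≠ ']') = [] by
              simp only [List.dropWhile_cons]; rw [if_pos (by simp [hcl])]; exact h2)]
            by_cases e1 : c = 'H' <;> by_cases e2 : c = 'R' <;> by_cases e3 : c = '*' <;>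
              simp [e1, e2, e3, Prod.ext_iff] <;> omega
          | cons y rest2 =>
            have hlen2 : rest2.length ≤ n := by
              have := rest'.length_dropWhile_le (· ≠ ']')
              rw [h2] at this; simp at this hlen1'; omega
            simp only [h2]
            rw [ih rest2 hlen2 _ _]
            rw [dif_neg (show ¬ (c :: rest').dropWhile (· ≠ ']') = [] by
              simp only [List.dropWhile_cons]; rw [if_pos (by simp [hcl])]; rw [h2]; simp)]
            rw [show ((c :: rest').dropWhile (· ≠ ']')).tail = rest2 by
              simp only [List.dropWhile_cons]; rw [if_pos (by simp [hcl])]; rw [h2]; rfl]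
            by_cases e1 : c = 'H' <;> by_cases e2 : c = 'R' <;> by_cases e3 : c = '*' <;>
              simp [e1, e2, e3, Prod.ext_iff] <;> omega

-- ===== VERDICT (by name: the statement is the Claim_ definition above) =====
theorem count_heavy_atoms_and_substitution_sites_spec : Claim_equal_count_heavy_atoms_and_substitution_sites := by
  intro smi _
  unfold Spec_count_heavy_atoms_and_substitution_sites
  unfold count_heavy_atoms_and_substitution_sites count_heavy_atoms_and_substitution_sites_alt
  have := main_lemma smi.toList.length smi.toList (le_refl _) 0 0
  simp only [zero_add] at this
  simp only [this]
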